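-- pv_equiv track=rewrite | github.com/LoST-0/Portfolio | burrows_wheeler/burrows_wheeler_transform.py | count_equal_letter_run
-- ===== SOURCE A (Python) =====
-- def count_equal_letter_run(text):
--     if not text:
--         return 0
--
--     run_count = 1
--     current_char = text[0]
--
--     for char in text[1:]:
--         if char != current_char:
--             run_count += 1
--             current_char = char
--
--     return run_count
-- ===== SOURCE B (Python) =====
-- def count_equal_letter_run(text):
--     # Divide and conquer: runs(l + r) = runs(l) + runs(r), minus one if the
--     # runs at the seam share the same character and therefore merge.
--     if not text:
--         return 0
--     if len(text) == 1:
--         return 1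
--     mid = len(text) // 2
--     left, right = text[:mid], text[mid:]
--     merged = 1 if left[-1] == right[0] else 0
--     return count_equal_letter_run(left) + count_equal_letter_run(right) - merged
-- ===== Notes on version B (the rewrite author's own statement) =====
-- stated objective: alternative
-- what changed: Replaces A's single linear pass with current_char/run_count state by a recursive divide-and-conquer: split the string in half, count runs in each half, and subtract one when the halves meet on the same character (the seam runs merge).
import Mathlib
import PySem

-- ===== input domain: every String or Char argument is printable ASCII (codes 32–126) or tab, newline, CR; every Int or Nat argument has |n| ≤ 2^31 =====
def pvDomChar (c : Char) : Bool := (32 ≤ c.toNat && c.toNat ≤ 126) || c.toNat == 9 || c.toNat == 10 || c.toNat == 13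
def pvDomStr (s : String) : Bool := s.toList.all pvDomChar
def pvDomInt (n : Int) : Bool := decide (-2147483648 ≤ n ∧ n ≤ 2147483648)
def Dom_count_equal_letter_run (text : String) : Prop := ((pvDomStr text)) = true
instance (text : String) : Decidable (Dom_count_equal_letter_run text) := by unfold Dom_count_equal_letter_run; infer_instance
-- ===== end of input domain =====

-- B replaces A's linear current_char/run_count pass by divide-and-conquer:
-- runs(l ++ r) = runs(l) + runs(r) − 1 when the seam characters coincide; same values.

-- ===== PORT A =====
def count_equal_letter_run (text : String) : Int :=
  match text.toList with
  | [] => 0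
  | c :: rest =>
    (rest.foldl (fun (s : Int × Char) ch => if ch ≠ s.2 then (s.1 + 1, ch) else s) (1, c)).1

-- ===== PORT B =====
-- recursive halving on the character list, as in Source B
def pvSplitCount (l : List Char) : Int :=
  if h0 : l = [] then 0
  else if h1 : l.length = 1 then 1
  else
    let mid := l.length / 2
    let left := l.take mid
    let right := l.drop mid
    let merged : Int := if left.getLast? = right.head? then 1 else 0
    pvSplitCount left + pvSplitCount right - merged
termination_by l.length
decreasing_by
  · have hn : l.length ≠ 0 := by simpa [List.length_eq_zero_iff] using h0
    simp only [List.length_take]; omega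
  · have hn : l.length ≠ 0 := by simpa [List.length_eq_zero_iff] using h0
    simp only [List.length_drop]; omega

def count_equal_letter_run_alt (text : String) : Int :=
  pvSplitCount text.toList

-- ===== PRECONDITION & SPEC =====
def Spec_count_equal_letter_run (text : String) (out : Int) : Prop := out = count_equal_letter_run_alt text
instance (text : String) (out : Int) : Decidable (Spec_count_equal_letter_run text out) := by unfold Spec_count_equal_letter_run; infer_instance

-- ===== CLAIM (what is proved, stated in full; the proofs are below) =====
def Claim_equal_count_equal_letter_run : Prop := ∀ (text : String), Dom_count_equal_letter_run text → Spec_count_equal_letter_run text (count_equal_letter_run text)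

-- ===== LEMMAS AND PROOFS =====

-- reference run count: adjacent-transition recursion
def pvCR : List Char → Int
  | [] => 0
  | [_] => 1
  | a :: b :: l => (if b = a then 0 else 1) + pvCR (b :: l)

theorem pvCR_concat : ∀ (l r : List Char), l ≠ [] → r ≠ [] →
    pvCR (l ++ r) = pvCR l + pvCR r - (if l.getLast? = r.head? then 1 else 0) := by
  intro l
  induction l with
  | nil => intro r h _; exact absurd rfl h
  | cons a l ih =>
    intro r _ hr
    cases l with
    | nil =>
      cases r with
      | nil => exact absurd rfl hr
      | cons b r' =>
        simp only [List.cons_append, List.nil_append, List.getLast?_singleton, List.head?_cons]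
        rw [pvCR]
        by_cases h : a = b
        · subst h; simp [pvCR]
        · have hba : ¬ (b = a) := fun e => h e.symm
          simp only [pvCR, if_neg hba, Option.some.injEq, if_neg h]
          ring
    | cons a' l' =>
      have hne : (a' :: l') ≠ [] := by simp
      have h1 : pvCR ((a' :: l') ++ r) = pvCR (a' :: l') + pvCR r -
          (if (a' :: l').getLast? = r.head? then 1 else 0) := ih r hne hr
      have hgl : (a :: a' :: l').getLast? = (a' :: l').getLast? := by
        simp [List.getLast?_cons_cons]
      calc pvCR ((a :: a' :: l') ++ r)
          = (if a' = a then 0 else 1) + pvCR ((a' :: l') ++ r) := by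
            simp only [List.cons_append]
            rw [pvCR]
        _ = (if a' = a then 0 else 1) + (pvCR (a' :: l') + pvCR r -
              (if (a' :: l').getLast? = r.head? then 1 else 0)) := by rw [h1]
        _ = pvCR (a :: a' :: l') + pvCR r -
              (if (a :: a' :: l').getLast? = r.head? then 1 else 0) := by
            rw [pvCR, hgl]; ring

theorem pvSplitCount_eq_pvCR (l : List Char) : pvSplitCount l = pvCR l := by
  induction l using pvSplitCount.induct with
  | case1 => rw [pvSplitCount]; simp [pvCR]
  | case2 l h0 h1 =>
    obtain ⟨c, rfl⟩ := List.length_eq_one_iff.mp h1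
    rw [pvSplitCount]; simp [pvCR]
  | case3 l h0 h1 mid left right ihl ihr =>
    have hlen : 2 ≤ l.length := by
      have hn : l.length ≠ 0 := by simpa [List.length_eq_zero_iff] using h0
      omega
    have hmid1 : 1 ≤ mid := by simp only [mid]; omega
    have hmidlt : mid < l.length := by simp only [mid]; omega
    have hleft : left ≠ [] := by
      simp only [left, ← List.length_pos_iff, List.length_take]; omega
    have hright : right ≠ [] := by
      simp only [right, ← List.length_pos_iff, List.length_drop]; omega
    rw [pvSplitCount]
    simp only [dif_neg h0, dif_neg h1]
    rw [ihl, ihr]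
    have hsplit : l = left ++ right := (List.take_append_drop mid l).symm
    conv_rhs => rw [hsplit]
    rw [pvCR_concat left right hleft hright]

theorem pv_foldl_eq (l : List Char) : ∀ (n : Int) (c : Char),
    (l.foldl (fun (s : Int × Char) ch => if ch ≠ s.2 then (s.1 + 1, ch) else s) (n, c)).1
      = n - 1 + pvCR (c :: l) := by
  induction l with
  | nil => intro n c; simp [pvCR]
  | cons ch l ih =>
    intro n c
    rw [List.foldl_cons]
    by_cases h : ch = c
    · subst h
      simp only [ne_eq, not_true_eq_false, if_false]
      rw [ih, pvCR]
      simp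
    · simp only [ne_eq, h, not_false_eq_true, if_true]
      rw [ih, pvCR]
      simp only [if_neg h]
      ring

theorem count_equal_letter_run_spec : Claim_equal_count_equal_letter_run := by
  intro text _
  unfold Spec_count_equal_letter_run count_equal_letter_run count_equal_letter_run_alt
  rw [pvSplitCount_eq_pvCR]
  match text.toList with
  | [] => simp [pvCR]
  | c :: rest =>
    simp only
    rw [pv_foldl_eq]
    ring
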